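-- pv_equiv track=rewrite | github.com/MPurushothamRao/Codon-Optimiser-by-codon-bias | generate.py | generate_dot_matrix
-- ===== SOURCE A (Python) =====
-- def generate_dot_matrix(seq1, seq2, window_size=3):
--     matrix = []
--     for i in range(len(seq1) - window_size + 1):
--         row = []
--         for j in range(len(seq2) - window_size + 1):
--             if seq1[i:i + window_size] == seq2[j:j + window_size]:
--                 row.append(1)
--             else:
--                 row.append(0)
--         matrix.append(row)
--
--     return matrix
-- ===== SOURCE B (Python) =====
-- def generate_dot_matrix(seq1, seq2, window_size=3):
--     n2 = len(seq2) - window_size + 1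
--     index = {}
--     for j in range(n2):
--         index.setdefault(seq2[j:j + window_size], []).append(j)
--     matrix = []
--     for i in range(len(seq1) - window_size + 1):
--         row = [0] * n2
--         for j in index.get(seq1[i:i + window_size], []):
--             row[j] = 1
--         matrix.append(row)
--     return matrix
-- ===== Notes on version B (the rewrite author's own statement) =====
-- stated objective: alternative
-- what changed: Replaces the all-pairs window comparison (every i against every j) by building an inverted index from each seq2 window to its positions once, then filling each zero row sparsely: only the j positions whose seq2 window equals seq1's window at i are set to 1.
import Mathlib
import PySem

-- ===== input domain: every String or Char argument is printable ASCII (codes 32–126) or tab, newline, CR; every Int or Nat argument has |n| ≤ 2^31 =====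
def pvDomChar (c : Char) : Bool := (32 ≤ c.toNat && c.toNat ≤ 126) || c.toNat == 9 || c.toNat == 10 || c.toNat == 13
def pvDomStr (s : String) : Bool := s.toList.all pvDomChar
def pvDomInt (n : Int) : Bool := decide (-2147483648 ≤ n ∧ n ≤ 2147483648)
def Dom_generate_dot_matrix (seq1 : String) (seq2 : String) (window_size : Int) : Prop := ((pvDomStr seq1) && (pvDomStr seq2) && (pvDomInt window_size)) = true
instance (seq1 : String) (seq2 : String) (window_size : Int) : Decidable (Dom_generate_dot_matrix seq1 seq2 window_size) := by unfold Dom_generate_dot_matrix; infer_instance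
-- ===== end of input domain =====

-- B replaces A's all-pairs window comparison by an inverted index of seq2's windows and a
-- sparse row fill over only the matching positions (objective: alternative algorithm; the
-- dense output matrix keeps the overall cost quadratic).

-- ===== PORT A =====
-- literal transliteration of A: nested loops over both window ranges, appending 1/0 per comparison
def generate_dot_matrix (seq1 : String) (seq2 : String) (window_size : Int) : List (List Int) :=
  let s1 := seq1.toList
  let s2 := seq2.toList
  (PySem.List.pyRange 0 ((s1.length : Int) - window_size + 1) 1).foldl
    (fun matrix i =>
      matrix ++ [(PySem.List.pyRange 0 ((s2.length : Int) - window_size + 1) 1).foldl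
        (fun row j =>
          if PySem.List.slice s1 (some i) (some (i + window_size))
              == PySem.List.slice s2 (some j) (some (j + window_size))
          then row ++ [(1 : Int)]
          else row ++ [(0 : Int)]) []]) []

-- ===== PORT B =====
-- literal transliteration of B: build index : window → list of j, then fill each zero row sparsely
def generate_dot_matrix_alt (seq1 : String) (seq2 : String) (window_size : Int) : List (List Int) :=
  let s1 := seq1.toList
  let s2 := seq2.toList
  let n2 : Int := (s2.length : Int) - window_size + 1
  let index : PySem.Dict (List Char) (List Int) :=
    (PySem.List.pyRange 0 n2 1).foldl
      (fun d j => d.modify (PySem.List.slice s2 (some j) (some (j + window_size))) [] (· ++ [j]))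
      PySem.Dict.empty
  (PySem.List.pyRange 0 ((s1.length : Int) - window_size + 1) 1).foldl
    (fun matrix i =>
      let row := (index.getD (PySem.List.slice s1 (some i) (some (i + window_size))) []).foldl
        (fun row j => PySem.List.pySetD row j 1) (PySem.List.pyRepeat [(0 : Int)] n2)
      matrix ++ [row]) []

-- ===== PRECONDITION & SPEC =====
def Spec_generate_dot_matrix (seq1 : String) (seq2 : String) (window_size : Int) (out : List (List Int)) : Prop := out = generate_dot_matrix_alt seq1 seq2 window_size
instance (seq1 : String) (seq2 : String) (window_size : Int) (out : List (List Int)) : Decidable (Spec_generate_dot_matrix seq1 seq2 window_size out) := by unfold Spec_generate_dot_matrix; infer_instance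

-- ===== CLAIM (what is proved, stated in full; the proofs are below) =====
def Claim_equal_generate_dot_matrix : Prop := ∀ (seq1 : String) (seq2 : String) (window_size : Int), Dom_generate_dot_matrix seq1 seq2 window_size → Spec_generate_dot_matrix seq1 seq2 window_size (generate_dot_matrix seq1 seq2 window_size)

-- ===== LEMMAS AND PROOFS =====

-- the index built by B maps a window c to exactly the j of the range whose seq2-window is c
lemma pv_index_getD (k2 : Int → List Char) (n2 : Int) (c : List Char) :
    (((PySem.List.pyRange 0 n2 1).foldl
        (fun d j => d.modify (k2 j) [] (· ++ [j])) PySem.Dict.empty).getD c [])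
      = (PySem.List.pyRange 0 n2 1).filter (fun j => k2 j == c) := by
  have h : ((PySem.List.pyRange 0 n2 1).foldl
        (fun d j => d.modify (k2 j) [] (· ++ [j])) PySem.Dict.empty)
      = (((PySem.List.pyRange 0 n2 1).map (fun j => (k2 j, j))).foldl
        (fun d p => d.modify p.1 [] (· ++ [p.2])) PySem.Dict.empty) := by
    rw [List.foldl_map]
  rw [h, PySem.Dict.getD_foldl_modify_append, PySem.Dict.getD_empty]
  rw [List.filter_map, List.map_map]
  simp [Function.comp_def]

-- length is preserved through the sparse fill
lemma pv_fold_set_length (js : List Int) (r : List Int) :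
    (js.foldl (fun r j => PySem.List.pySetD r j 1) r).length = r.length := by
  induction js generalizing r with
  | nil => rfl
  | cons j js ih => simp [List.foldl_cons, ih, PySem.List.length_pySetD]

-- value at position k after the sparse fill: 1 if k is one of the filled positions, else unchanged
lemma pv_fold_set_getElem? (js : List Int) (r : List Int) (k : Nat)
    (hall : ∀ j ∈ js, 0 ≤ j) (hk : k < r.length) :
    (js.foldl (fun r j => PySem.List.pySetD r j 1) r)[k]?
      = if (k : Int) ∈ js then some 1 else r[k]? := by
  induction js generalizing r with
  | nil => simp
  | cons j js ih =>
    have hj : 0 ≤ j := hall j (List.mem_cons_self ..)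
    rw [List.foldl_cons,
      ih _ (fun x hx => hall x (List.mem_cons_of_mem _ hx))
        (by rw [PySem.List.length_pySetD]; exact hk),
      PySem.List.pySetD_of_nonneg _ _ hj]
    by_cases hmem : (k : Int) ∈ js
    · simp [hmem]
    · rw [List.getElem?_set]
      by_cases hkj : (k : Int) = j
      · have hjk : j.toNat = k := by omega
        simp [hjk, hkj, hk]
      · have hne : j.toNat ≠ k := by omega
        simp [hne, hkj, hmem]

-- one row of B equals one row of A
lemma pv_row_eq (c : List Char) (k2 : Int → List Char) (n2 : Int) :
    (((PySem.List.pyRange 0 n2 1).filter (fun j => k2 j == c)).foldl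
        (fun r j => PySem.List.pySetD r j 1) (PySem.List.pyRepeat [(0 : Int)] n2))
      = (PySem.List.pyRange 0 n2 1).map (fun j => if c == k2 j then (1 : Int) else 0) := by
  have hrep : PySem.List.pyRepeat [(0 : Int)] n2 = List.replicate n2.toNat 0 :=
    PySem.List.pyRepeat_singleton ..
  have hlen0 : (PySem.List.pyRepeat [(0 : Int)] n2).length = n2.toNat := by
    rw [hrep, List.length_replicate]
  apply List.ext_getElem?
  intro k
  by_cases hkn : k < n2.toNat
  · have hklt : (k : Int) < n2 := by omega
    rw [pv_fold_set_getElem? _ _ k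
        (fun j hj => by
          have := (PySem.List.mem_pyRange_one).1 (List.mem_filter.1 hj).1
          omega)
        (by rw [hlen0]; exact hkn)]
    have hmemrange : (k : Int) ∈ PySem.List.pyRange 0 n2 1 :=
      (PySem.List.mem_pyRange_one).2 ⟨by omega, hklt⟩
    have hmem : ((k : Int) ∈ (PySem.List.pyRange 0 n2 1).filter (fun j => k2 j == c))
        ↔ (k2 (k : Int) == c) = true := by
      rw [List.mem_filter]
      exact ⟨fun h => h.2, fun h => ⟨hmemrange, h⟩⟩
    have hrhs : ((PySem.List.pyRange 0 n2 1).map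
        (fun j => if c == k2 j then (1 : Int) else 0))[k]?
        = some (if c == k2 (k : Int) then (1 : Int) else 0) := by
      rw [List.getElem?_map, List.getElem?_eq_getElem
        (by rw [PySem.List.length_pyRange_one]; omega : k < (PySem.List.pyRange 0 n2 1).length)]
      rw [PySem.List.getElem_pyRange_one]
      simp
    rw [hrhs]
    by_cases hc : c = k2 (k : Int)
    · rw [if_pos (hmem.2 (by simp [hc])), if_pos (by simp [hc])]
    · rw [if_neg (fun h => hc (eq_of_beq (hmem.1 h)).symm), if_neg (by simp [hc]),
        hrep, List.getElem?_replicate, if_pos hkn]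
  · have h1 : (((PySem.List.pyRange 0 n2 1).filter (fun j => k2 j == c)).foldl
        (fun r j => PySem.List.pySetD r j 1) (PySem.List.pyRepeat [(0 : Int)] n2)).length ≤ k := by
      rw [pv_fold_set_length, hlen0]; omega
    have h2 : ((PySem.List.pyRange 0 n2 1).map
        (fun j => if c == k2 j then (1 : Int) else 0)).length ≤ k := by
      rw [List.length_map, PySem.List.length_pyRange_one]; omega
    rw [List.getElem?_eq_none h1, List.getElem?_eq_none h2]

-- the inner loop of A is a map
lemma pv_a_inner (c : List Char) (k2 : Int → List Char) (n2 : Int) :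
    ((PySem.List.pyRange 0 n2 1).foldl
        (fun row j => if c == k2 j then row ++ [(1 : Int)] else row ++ [(0 : Int)]) [])
      = (PySem.List.pyRange 0 n2 1).map (fun j => if c == k2 j then (1 : Int) else 0) := by
  have hbody : (fun (row : List Int) j => if c == k2 j then row ++ [(1 : Int)] else row ++ [(0 : Int)])
      = fun row j => row ++ [if c == k2 j then (1 : Int) else 0] := by
    funext row j
    by_cases h : c == k2 j <;> simp [h]
  rw [hbody, PySem.List.foldl_append_singleton_eq_map]
  simp

-- ===== VERDICT (by name: the statement is the Claim_ definition above) =====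
theorem generate_dot_matrix_spec : Claim_equal_generate_dot_matrix := by
  intro seq1 seq2 w _
  unfold Spec_generate_dot_matrix generate_dot_matrix generate_dot_matrix_alt
  rw [PySem.List.foldl_append_singleton_eq_map, PySem.List.foldl_append_singleton_eq_map]
  simp only [List.nil_append]
  apply List.map_congr_left
  intro i _
  rw [pv_index_getD (fun j => PySem.List.slice seq2.toList (some j) (some (j + w)))]
  rw [pv_row_eq, pv_a_inner]
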